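-- pv_equiv track=rewrite | github.com/sue-zadeh/python-test | mocktype4.py | solution
-- ===== SOURCE A (Python) =====
-- def solution(n):
--     result = []  # Create an empty list to store each line
--
--     for i in range(n):  # Outer loop for each row
--         line = ""  # Start with an empty string for the current row
--
--         for j in range(n):  # Inner loop for each column
--             if i == 0 or i == n - 1:  # First or last row
--                 line = line + "*"
--             elif j == 0 or j == n - 1:  # First or last column
--                 line = line + "*"
--             else:  # Middle of the frame
--                 line = line + " "
--
--         result.append(line)  # Add the full line to the result
--
--     return result  # Return the list of lines
-- ===== SOURCE B (Python) =====
-- def solution(n):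
--     result = []
--     for i in range(n):
--         if i == 0 or i == n - 1:
--             result.append("*" * n)
--         else:
--             result.append("*" + " " * (n - 2) + "*")
--     return result
-- ===== Notes on version B (the rewrite author's own statement) =====
-- stated objective: simpler
-- what changed: Replaces A's nested cell-by-cell loop (building each line one character at a time) with a single pass over row indices that emits each whole line in closed form ('*'*n for border rows, '*'+' '*(n-2)+'*' for interior rows).
import Mathlib
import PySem

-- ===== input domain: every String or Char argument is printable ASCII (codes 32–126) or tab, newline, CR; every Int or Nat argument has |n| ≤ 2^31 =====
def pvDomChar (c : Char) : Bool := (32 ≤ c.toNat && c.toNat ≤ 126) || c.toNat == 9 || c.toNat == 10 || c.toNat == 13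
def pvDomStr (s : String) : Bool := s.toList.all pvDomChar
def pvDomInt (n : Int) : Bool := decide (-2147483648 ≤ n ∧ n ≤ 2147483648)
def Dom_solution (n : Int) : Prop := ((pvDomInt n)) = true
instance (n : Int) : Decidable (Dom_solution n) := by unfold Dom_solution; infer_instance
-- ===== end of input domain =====

-- B replaces A's nested per-character loop with a single pass over rows, emitting each line in closed form (simpler).


-- ===== PORT A =====
-- Strings are accumulated on the List Char side (exact for code points); String.ofList packs the finished line.
def solution (n : Int) : List String :=
  (PySem.List.pyRange 0 n 1).foldl (fun result i =>
    let line : List Char :=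
      (PySem.List.pyRange 0 n 1).foldl (fun line j =>
        if i == 0 || i == n - 1 then line ++ ['*']
        else if j == 0 || j == n - 1 then line ++ ['*']
        else line ++ [' ']) []
    result ++ [String.ofList line]) []

-- ===== PORT B =====
def solution_alt (n : Int) : List String :=
  (PySem.List.pyRange 0 n 1).foldl (fun result i =>
    if i == 0 || i == n - 1 then
      result ++ [String.ofList (List.replicate n.toNat '*')]
    else
      result ++ [String.ofList ('*' :: List.replicate (n - 2).toNat ' ' ++ ['*'])]) []

-- ===== PRECONDITION & SPEC =====
def Spec_solution (n : Int) (out : List String) : Prop := out = solution_alt n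
instance (n : Int) (out : List String) : Decidable (Spec_solution n out) := by unfold Spec_solution; infer_instance

-- ===== CLAIM (what is proved, stated in full; the proofs are below) =====
def Claim_equal_solution : Prop := ∀ (n : Int), Dom_solution n → Spec_solution n (solution n)

-- ===== LEMMAS AND PROOFS =====

-- the per-row cell function of A
def pvCell (n i j : Int) : Char :=
  if i == 0 || i == n - 1 then '*'
  else if j == 0 || j == n - 1 then '*'
  else ' '

-- A's inner loop builds exactly the map of pvCell over the column range
theorem pvInner_eq_map (n i : Int) :
    (PySem.List.pyRange 0 n 1).foldl (fun line j =>
        if i == 0 || i == n - 1 then line ++ ['*']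
        else if j == 0 || j == n - 1 then line ++ ['*']
        else line ++ [' ']) [] = (PySem.List.pyRange 0 n 1).map (pvCell n i) := by
  have h := PySem.List.foldl_append_singleton_eq_map (pvCell n i) (PySem.List.pyRange 0 n 1) []
  simp only [List.nil_append] at h
  rw [← h]
  apply PySem.List.foldl_congr_mem
  intro acc j _
  unfold pvCell
  split_ifs <;> rfl

-- a border row's map is all stars
theorem pvMap_border (n i : Int) (hi : i == 0 || i == n - 1) :
    (PySem.List.pyRange 0 n 1).map (pvCell n i) = List.replicate n.toNat '*' := by
  have : ∀ j ∈ PySem.List.pyRange 0 n 1, pvCell n i j = '*' := by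
    intro j _; unfold pvCell; simp [hi]
  rw [List.map_congr_left this (g := fun _ => '*')]
  rw [List.map_const', PySem.List.length_pyRange_one]
  simp

-- an interior row's map is star, spaces, star
theorem pvMap_interior (n i : Int) (hi : ¬ (i == 0 || i == n - 1))
    (hmem : i ∈ PySem.List.pyRange 0 n 1) :
    (PySem.List.pyRange 0 n 1).map (pvCell n i) =
      '*' :: List.replicate (n - 2).toNat ' ' ++ ['*'] := by
  rw [PySem.List.mem_pyRange_one] at hmem
  simp only [beq_iff_eq, Bool.or_eq_true, not_or] at hi
  -- interior row exists ⇒ 0 < i < n - 1 ⇒ n ≥ 3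
  have hn : 3 ≤ n := by omega
  rw [PySem.List.pyRange_one_append 0 1 n (by omega) (by omega),
      PySem.List.pyRange_one_append 1 (n - 1) n (by omega) (by omega)]
  have h1 : PySem.List.pyRange 0 1 1 = [0] := PySem.List.pyRange_one_singleton 0
  have h2 : PySem.List.pyRange (n - 1) n 1 = [n - 1] := by
    have := PySem.List.pyRange_one_singleton (n - 1)
    simpa [sub_add_cancel] using this
  rw [h1, h2]
  simp only [List.map_append, List.map_cons, List.map_nil]
  have hmid : (PySem.List.pyRange 1 (n - 1) 1).map (pvCell n i) =
      List.replicate (n - 2).toNat ' ' := by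
    have hall : ∀ j ∈ PySem.List.pyRange 1 (n - 1) 1, pvCell n i j = ' ' := by
      intro j hj
      rw [PySem.List.mem_pyRange_one] at hj
      have hj0 : ¬ j = 0 := by omega
      have hj1 : ¬ j = n - 1 := by omega
      simp [pvCell, hi.1, hi.2, hj0, hj1]
    rw [List.map_congr_left hall (g := fun _ => ' ')]
    rw [List.map_const', PySem.List.length_pyRange_one]
    congr 1
    omega
  rw [hmid]
  have hc0 : pvCell n i 0 = '*' := by unfold pvCell; simp [hi.1, hi.2]
  have hc1 : pvCell n i (n - 1) = '*' := by unfold pvCell; simp [hi.1, hi.2]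
  rw [hc0, hc1]
  rfl

-- ===== VERDICT (by name: the statement is the Claim_ definition above) =====
theorem solution_spec : Claim_equal_solution := by
  intro n _
  unfold Spec_solution solution solution_alt
  apply PySem.List.foldl_congr_mem
  intro acc i hmem
  rw [pvInner_eq_map]
  by_cases hi : (i == 0 || i == n - 1) = true
  · rw [pvMap_border n i hi]
    simp [hi]
  · rw [pvMap_interior n i (by simpa using hi) hmem]
    simp only [Bool.not_eq_true] at hi
    simp [hi]
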